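-- pv_equiv track=rewrite | github.com/phintruong/Trace-Me-If-You-Can | backend/app/pipeline/graph_builder.py | _find_circular_accounts
-- ===== SOURCE A (Python) =====
-- from collections import defaultdict
--
-- def _find_circular_accounts(edges: list[dict]) -> set[str]:
--     out_adj: dict[str, set[str]] = defaultdict(set)
--     for e in edges:
--         out_adj[e["from"]].add(e["to"])
--     in_circle = set()
--     for src, dst_set in out_adj.items():
--         for dst in dst_set:
--             if src in out_adj.get(dst, set()):
--                 in_circle.add(src)
--                 in_circle.add(dst)
--     return in_circle
-- ===== SOURCE B (Python) =====
-- def _find_circular_accounts(edges: list[dict]) -> set[str]: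
--     # Brute force over a flat set of directed pairs: no adjacency map at all.
--     pairs = {(e["from"], e["to"]) for e in edges}
--     accounts = {e["from"] for e in edges}
--     res: set[str] = set()
--     for s in accounts:
--         for (a, b) in pairs:
--             if a == s and (b, a) in pairs:
--                 res.add(a)
--                 res.add(b)
--     return res
-- ===== Notes on version B (the rewrite author's own statement) =====
-- stated objective: alternative
-- what changed: B drops A's per-source adjacency dict entirely: it builds one flat set of directed (from,to) pairs plus the set of source accounts, and for each account brute-force scans all pairs, keeping those whose reverse pair is also in the flat set.
-- outside the precondition, e.g. on _find_circular_accounts([{'to': 'b'}]): A raises KeyError, B raises KeyError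
import Mathlib
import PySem

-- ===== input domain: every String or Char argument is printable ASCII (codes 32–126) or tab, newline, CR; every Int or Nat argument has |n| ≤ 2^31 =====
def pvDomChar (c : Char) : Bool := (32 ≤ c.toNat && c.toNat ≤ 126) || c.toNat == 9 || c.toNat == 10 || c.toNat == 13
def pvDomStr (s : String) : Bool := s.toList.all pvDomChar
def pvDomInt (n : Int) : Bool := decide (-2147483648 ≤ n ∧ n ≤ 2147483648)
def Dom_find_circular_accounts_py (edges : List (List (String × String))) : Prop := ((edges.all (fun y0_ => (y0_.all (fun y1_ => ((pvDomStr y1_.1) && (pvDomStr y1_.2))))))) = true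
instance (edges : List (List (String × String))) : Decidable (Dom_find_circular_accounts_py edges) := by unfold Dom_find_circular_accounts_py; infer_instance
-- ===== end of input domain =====

-- B drops A's per-source adjacency dict: it builds one flat set of directed (from,to) pairs plus
-- the set of source accounts and brute-force scans all pairs per account, testing the reverse pair.
-- Return-value equivalence only; neither program mutates its argument.

-- shared dict-access helper: e["from"] / e["to"] under Pre_ (first-match lookup; "" only outside Pre_)
def pvLook (e : List (String × String)) (k : String) : String :=
  ((e.find? (fun p => p.1 == k)).map (·.2)).getD ""

-- ===== PORT A =====
def find_circular_accounts_py (edges : List (List (String × String))) : List String :=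
  let oa : PySem.Dict String (PySem.Set String) :=
    edges.foldl
      (fun d e => d.modify (pvLook e "from") [] (fun s => PySem.Set.add s (pvLook e "to")))
      PySem.Dict.empty
  oa.items.foldl
    (fun acc p =>
      p.2.foldl
        (fun acc dst =>
          if (oa.getD dst []).contains p.1 then PySem.Set.add (PySem.Set.add acc p.1) dst
          else acc)
        acc)
    []

-- ===== PORT B =====
def find_circular_accounts_py_alt (edges : List (List (String × String))) : List String :=
  let pairs : PySem.Set (String × String) :=
    PySem.Set.ofList (edges.map (fun e => (pvLook e "from", pvLook e "to")))
  let accounts : PySem.Set String :=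
    PySem.Set.ofList (edges.map (fun e => pvLook e "from"))
  accounts.foldl
    (fun res s =>
      pairs.foldl
        (fun res p =>
          if p.1 == s && pairs.contains (p.2, p.1) then
            PySem.Set.add (PySem.Set.add res p.1) p.2
          else res)
        res)
    []

-- ===== PRECONDITION & SPEC =====
-- Pre_ excludes edge dicts missing the "from" or "to" key, on which the Python A raises KeyError.
def Pre_find_circular_accounts_py (edges : List (List (String × String))) : Prop :=
  ∀ e ∈ edges, (e.find? (fun p => p.1 == "from")).isSome ∧ (e.find? (fun p => p.1 == "to")).isSome
instance (edges : List (List (String × String))) : Decidable (Pre_find_circular_accounts_py edges) := by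
  unfold Pre_find_circular_accounts_py; infer_instance
def pvWitness_find_circular_accounts_py : (List (List (String × String))) :=
  [[("from", "a"), ("to", "b")], [("from", "b"), ("to", "a")], [("from", "c"), ("to", "a")]]

def Spec_find_circular_accounts_py (edges : List (List (String × String))) (out : List String) : Prop := out = find_circular_accounts_py_alt edges
instance (edges : List (List (String × String))) (out : List String) : Decidable (Spec_find_circular_accounts_py edges out) := by unfold Spec_find_circular_accounts_py; infer_instance

-- ===== CLAIM (what is proved, stated in full; the proofs are below) =====
def Claim_equal_find_circular_accounts_py : Prop := ∀ (edges : List (List (String × String))), Dom_find_circular_accounts_py edges → Pre_find_circular_accounts_py edges → Spec_find_circular_accounts_py edges (find_circular_accounts_py edges)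

-- ===== LEMMAS AND PROOFS =====

-- the directed edge list, as (from, to) pairs
def pvPairs (edges : List (List (String × String))) : List (String × String) :=
  edges.map (fun e => (pvLook e "from", pvLook e "to"))

-- A's dict builder, restated over the pair list
def pvStep (d : PySem.Dict String (PySem.Set String)) (p : String × String) :
    PySem.Dict String (PySem.Set String) :=
  d.modify p.1 [] (fun s => PySem.Set.add s p.2)

lemma pvOa_eq (edges : List (List (String × String))) :
    edges.foldl
      (fun d e => d.modify (pvLook e "from") [] (fun s => PySem.Set.add s (pvLook e "to")))
      PySem.Dict.empty
    = (pvPairs edges).foldl pvStep PySem.Dict.empty := by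
  simp [pvPairs, List.foldl_map, pvStep]

lemma pvGetD_fold (l : List (String × String)) (d : PySem.Dict String (PySem.Set String))
    (c : String) :
    (l.foldl pvStep d).getD c [] =
      PySem.Set.update (d.getD c []) ((l.filter (fun p => p.1 == c)).map (·.2)) := by
  induction l generalizing d with
  | nil => simp [PySem.Set.update]
  | cons p t ih =>
    rw [List.foldl_cons, ih]
    by_cases h : p.1 = c
    · rw [List.filter_cons_of_pos (by simp [h]), List.map_cons, PySem.Set.update_cons,
        pvStep, PySem.Dict.getD_modify, if_pos h.symm, h]
    · rw [List.filter_cons_of_neg (by simp [h]), pvStep, PySem.Dict.getD_modify,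
        if_neg (fun hh => h hh.symm)]

-- first-occurrence dedup commutes with filter
lemma pvOfList_filter {α : Type} [BEq α] [LawfulBEq α] (q : α → Bool) (l : List α) :
    (PySem.Set.ofList l).filter q = PySem.Set.ofList (l.filter q) := by
  induction l using List.reverseRecOn with
  | nil => rfl
  | append_singleton t x ih =>
    rw [List.filter_append, PySem.Set.ofList_append_singleton, PySem.Set.add_eq_ite,
      List.filter_singleton]
    by_cases hm : x ∈ t
    · rw [if_pos (by rw [PySem.Set.mem_ofList]; exact hm), ih]
      cases hq : q x with
      | false => simp
      | true =>
        have hmem : x ∈ PySem.Set.ofList (t.filter q) := by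
          rw [PySem.Set.mem_ofList]; exact List.mem_filter.2 ⟨hm, hq⟩
        simp [PySem.Set.ofList_append_singleton, PySem.Set.add_of_mem hmem]
    · rw [if_neg (by rw [PySem.Set.mem_ofList]; exact hm), List.filter_append, ih,
        List.filter_singleton]
      cases hq : q x with
      | false => simp
      | true =>
        have hmem : x ∉ PySem.Set.ofList (t.filter q) := by
          rw [PySem.Set.mem_ofList]; exact fun hx => hm (List.mem_filter.1 hx).1
        simp [PySem.Set.ofList_append_singleton, PySem.Set.add_of_not_mem hmem]

-- dedup of pairs with a constant first component is the dedup of the second components, paired back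
lemma pvOfList_const_fst (s : String) (l : List (String × String))
    (h : ∀ p ∈ l, p.1 = s) :
    PySem.Set.ofList l = (PySem.Set.ofList (l.map (·.2))).map (fun d => (s, d)) := by
  induction l using List.reverseRecOn with
  | nil => rfl
  | append_singleton t x ih =>
    have hx : x.1 = s := h x (by simp)
    have ht : ∀ p ∈ t, p.1 = s := fun p hp => h p (by simp [hp])
    rw [List.map_append, List.map_singleton, PySem.Set.ofList_append_singleton,
      PySem.Set.ofList_append_singleton, ih ht, PySem.Set.add_eq_ite, PySem.Set.add_eq_ite]
    by_cases hm : x.2 ∈ PySem.Set.ofList (t.map (·.2))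
    · rw [if_pos hm, if_pos (List.mem_map.2 ⟨x.2, hm, by rw [← hx]⟩)]
    · rw [if_neg hm, if_neg (by
        rw [List.mem_map]
        rintro ⟨d, hd, hdx⟩
        subst hdx
        exact hm hd), List.map_append, List.map_singleton, ← hx]

-- membership in the built adjacency value ↔ the directed pair occurs
lemma pvMem_getD (L : List (String × String)) (a b : String) :
    b ∈ (L.foldl pvStep PySem.Dict.empty).getD a [] ↔ (a, b) ∈ L := by
  rw [pvGetD_fold, PySem.Dict.getD_empty, PySem.Set.mem_update]
  constructor
  · rintro (h | h)
    · simp at h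
    · rcases List.mem_map.1 h with ⟨p, hp, rfl⟩
      rcases List.mem_filter.1 hp with ⟨hmem, hq⟩
      have : p.1 = a := by simpa using hq
      rwa [← this]
  · intro h
    exact Or.inr (List.mem_map.2 ⟨(a, b), List.mem_filter.2 ⟨h, by simp⟩, rfl⟩)

-- the two inner loops agree, for one source s
lemma pvInner_eq (L : List (String × String)) (s : String) (acc : List String) :
    ((L.foldl pvStep PySem.Dict.empty).getD s []).foldl
      (fun acc dst =>
        if ((L.foldl pvStep PySem.Dict.empty).getD dst []).contains s then
          PySem.Set.add (PySem.Set.add acc s) dst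
        else acc)
      acc
    = (PySem.Set.ofList L).foldl
        (fun res p =>
          if p.1 == s && (PySem.Set.ofList L).contains (p.2, p.1) then
            PySem.Set.add (PySem.Set.add res p.1) p.2
          else res)
        acc := by
  have hbody :
      (PySem.Set.ofList L).foldl
        (fun res p =>
          if p.1 == s && (PySem.Set.ofList L).contains (p.2, p.1) then
            PySem.Set.add (PySem.Set.add res p.1) p.2
          else res)
        acc
      = ((PySem.Set.ofList L).filter (fun p => p.1 == s)).foldl
          (fun res p =>
            if (PySem.Set.ofList L).contains (p.2, p.1) then
              PySem.Set.add (PySem.Set.add res p.1) p.2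
            else res)
          acc := by
    rw [List.foldl_filter]
    apply PySem.List.foldl_congr_mem
    intro res p _
    by_cases h1 : p.1 == s <;> simp [h1]
  rw [hbody, pvOfList_filter,
    pvOfList_const_fst s (L.filter (fun p => p.1 == s))
      (fun p hp => by simpa using (List.mem_filter.1 hp).2),
    List.foldl_map, pvGetD_fold, PySem.Dict.getD_empty, PySem.Set.update_nil_left]
  apply PySem.List.foldl_congr_mem
  intro res d _
  simp [pvMem_getD]

-- ===== VERDICT (by name: the statement is the Claim_ definition above) =====
theorem find_circular_accounts_py_spec : Claim_equal_find_circular_accounts_py := by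
  intro edges _ _
  unfold Spec_find_circular_accounts_py
  simp only [find_circular_accounts_py, find_circular_accounts_py_alt]
  rw [pvOa_eq]
  set L := pvPairs edges with hL
  have hmapfrom : edges.map (fun e => pvLook e "from") = L.map (·.1) := by
    rw [hL, pvPairs, List.map_map]; rfl
  have hpairs : edges.map (fun e => (pvLook e "from", pvLook e "to")) = L := hL.symm
  have hnodup : (L.foldl pvStep PySem.Dict.empty).keys.Nodup := by
    have := PySem.Dict.nodup_keys_foldl_modify_key L (fun p => p.1) []
      (fun _ p => fun s => PySem.Set.add s p.2) PySem.Dict.empty (by simp [PySem.Dict.keys_empty])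
    simpa [pvStep] using this
  have hkeys : (L.foldl pvStep PySem.Dict.empty).keys = PySem.Set.ofList (L.map (·.1)) := by
    have := PySem.Dict.keys_foldl_modify_key L (fun p => p.1) []
      (fun _ p => fun s => PySem.Set.add s p.2) PySem.Dict.empty
    simpa [pvStep, PySem.Dict.keys_empty, PySem.Set.update_nil_left] using this
  rw [PySem.Dict.items_eq_map_keys _ hnodup [], List.foldl_map, hkeys, hmapfrom, hpairs]
  apply PySem.List.foldl_congr_mem
  intro acc s _
  exact pvInner_eq L s acc
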